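-- pv_equiv track=rewrite | github.com/m1yur1/Sniper_Elite_4_text_converter | t2x.py | ascii_to_text
-- ===== SOURCE A (Python) =====
-- def ascii_to_text(blob):
-- 	result = ''
--
-- 	for uc_data in blob:
-- 		if (0 == uc_data):
-- 			break
-- 		#エスケープ不要の場合
-- 		if (0x5c != uc_data
-- 			and (0x20 <= uc_data <= 0x7e)):
-- 			result += format(uc_data, 'c')
-- 		#エスケープする場合
-- 		else:
-- 			result += '\\'
-- 			result += format(uc_data, '02x')
--
-- 	return result
-- ===== SOURCE B (Python) =====
-- def ascii_to_text(blob):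
--     # Run-segmentation: truncate at the NUL terminator, then walk the prefix
--     # with two indices, emitting each maximal run of directly-printable bytes
--     # in one bulk conversion and one escape between runs.
--     try:
--         end = blob.index(0)
--     except ValueError:
--         end = len(blob)
--     parts = []
--     i = 0
--     while i < end:
--         j = i
--         while j < end and 0x20 <= blob[j] <= 0x7e and blob[j] != 0x5c:
--             j += 1
--         parts.append(''.join(map(chr, blob[i:j])))
--         if j < end:
--             parts.append('\\' + format(blob[j], '02x'))
--             j += 1
--         i = j
--     return ''.join(parts)
-- ===== Notes on version B (the rewrite author's own statement) =====
-- stated objective: alternative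
-- what changed: Replaces A's byte-at-a-time scan-with-break that grows the string with += by a staged run-segmentation algorithm: first locate the NUL terminator (list.index with a length fallback), then walk the prefix with two indices, bulk-converting each maximal run of directly-printable bytes in one slice+join and emitting one escape between runs.
import Mathlib
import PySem

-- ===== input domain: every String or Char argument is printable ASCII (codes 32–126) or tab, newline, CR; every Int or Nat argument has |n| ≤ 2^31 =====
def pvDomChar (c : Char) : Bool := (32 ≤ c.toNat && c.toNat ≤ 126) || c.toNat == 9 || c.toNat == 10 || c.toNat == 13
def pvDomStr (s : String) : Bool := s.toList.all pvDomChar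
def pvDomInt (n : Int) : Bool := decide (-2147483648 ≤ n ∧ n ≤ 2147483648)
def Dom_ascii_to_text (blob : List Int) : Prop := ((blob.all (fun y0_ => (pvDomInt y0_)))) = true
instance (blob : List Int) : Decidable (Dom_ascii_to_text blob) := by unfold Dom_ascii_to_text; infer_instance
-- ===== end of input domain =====

-- B replaces A's byte-at-a-time scan-with-break loop by run segmentation: truncate at
-- the NUL terminator, then emit maximal runs of printable bytes in bulk with one escape
-- between runs; objective: alternative. Strings are handled as List Char and packed
-- with String.ofList (exact: only ASCII characters are produced).

-- shared helper: lowercase hex digits of a Nat, most significant first (n // 16 recursion)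
def pvHexNatChars : Nat → List Char → List Char
  | n, acc =>
    if h : n < 16 then Nat.digitChar n :: acc
    else pvHexNatChars (n / 16) (Nat.digitChar (n % 16) :: acc)
  decreasing_by exact Nat.div_lt_self (by omega) (by omega)

-- format(n, '02x'): sign, hex digits, zero-padded to total width 2 (hand port, exact)
def pvHex02x (n : Int) : List Char :=
  if n < 0 then '-' :: pvHexNatChars n.natAbs []
  else
    let ds := pvHexNatChars n.toNat []
    if ds.length = 1 then '0' :: ds else ds

-- ===== PORT A =====
-- the for-loop with break, accumulating 'result'
def asciiLoopA : List Int → List Char → List Char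
  | [], result => result
  | uc :: rest, result =>
    if uc = 0 then result
    else if uc ≠ 0x5c ∧ 0x20 ≤ uc ∧ uc ≤ 0x7e then
      asciiLoopA rest (result ++ [Char.ofNat uc.toNat])
    else
      asciiLoopA rest (result ++ '\\' :: pvHex02x uc)

def ascii_to_text (blob : List Int) : String :=
  String.ofList (asciiLoopA blob [])

-- ===== PORT B =====
-- the inner 'while j < end and printable' test of Source B
def pvPrintableB (b : Int) : Bool := (0x20 ≤ b && b ≤ 0x7e) && b != 0x5c

-- Source B's outer while loop: the inner while advances j over the maximal printable run
-- (blob[i:j] = takeWhile, the remainder = dropWhile), the run is emitted in bulk,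
-- then one escape, then the loop continues on the remainder
def emitRunsB (bs : List Int) : List Char :=
  let run := bs.takeWhile pvPrintableB
  match hr : bs.dropWhile pvPrintableB with
  | [] => run.map (fun b => Char.ofNat b.toNat)
  | b :: rest =>
      run.map (fun b => Char.ofNat b.toNat) ++ ('\\' :: pvHex02x b) ++ emitRunsB rest
termination_by bs.length
decreasing_by
  have h1 := (List.dropWhile_sublist (p := pvPrintableB) (l := bs)).length_le
  rw [hr] at h1
  simp at h1; omega

def ascii_to_text_alt (blob : List Int) : String :=
  let e := (PySem.List.index? blob 0).getD blob.length
  let pre := PySem.List.slice blob none (some (e : Int))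
  String.ofList (emitRunsB pre)

-- ===== PRECONDITION & SPEC =====
def Spec_ascii_to_text (blob : List Int) (out : String) : Prop := out = ascii_to_text_alt blob
instance (blob : List Int) (out : String) : Decidable (Spec_ascii_to_text blob out) := by unfold Spec_ascii_to_text; infer_instance

-- ===== CLAIM =====
def Claim_equal_ascii_to_text : Prop := ∀ (blob : List Int), Dom_ascii_to_text blob → Spec_ascii_to_text blob (ascii_to_text blob)

-- ===== LEMMAS AND PROOFS =====

-- proof-only: the per-byte escape both programs realise
def escB (b : Int) : List Char :=
  if 0x20 ≤ b ∧ b ≤ 0x7e ∧ b ≠ 0x5c then [Char.ofNat b.toNat]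
  else '\\' :: pvHex02x b

-- B's truncation (index of first 0, default the length, then slice) is takeWhile (≠ 0)
theorem slice_index_eq_takeWhile (bs : List Int) :
    PySem.List.slice bs none (some (((PySem.List.index? bs 0).getD bs.length : Nat) : Int))
      = bs.takeWhile (fun b => b ≠ 0) := by
  rw [PySem.List.slice_to_natCast]
  induction bs with
  | nil => simp
  | cons b bs ih =>
    by_cases hb : b = 0
    · subst hb
      rw [PySem.List.index?_cons_self]
      simp
    · rw [PySem.List.index?_cons_of_ne bs hb]
      cases h : PySem.List.index? bs 0 with
      | none =>
        rw [h] at ih; simp at ih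
        simpa [h, List.takeWhile_cons, hb] using ih
      | some k =>
        rw [h] at ih; simp at ih
        simpa [h, List.takeWhile_cons, hb] using ih

-- A's loop appends, to its accumulator, the escapes of the (≠ 0)-prefix
theorem asciiLoopA_eq (bs : List Int) (acc : List Char) :
    asciiLoopA bs acc = acc ++ ((bs.takeWhile (fun b => b ≠ 0)).map escB).flatten := by
  induction bs generalizing acc with
  | nil => simp [asciiLoopA]
  | cons b bs ih =>
    by_cases hb : b = 0
    · simp [asciiLoopA, hb]
    · by_cases hc : b ≠ 0x5c ∧ 0x20 ≤ b ∧ b ≤ 0x7e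
      · have he : escB b = [Char.ofNat b.toNat] := by
          unfold escB; rw [if_pos (by tauto)]
        simp [asciiLoopA, hb, hc, ih, he]
      · have he : escB b = '\\' :: pvHex02x b := by
          unfold escB; rw [if_neg (by tauto)]
        simp [asciiLoopA, hb, hc, ih, he]

-- unfolding lemmas for emitRunsB's two branches
theorem emitRunsB_drop_nil (bs : List Int) (h : bs.dropWhile pvPrintableB = []) :
    emitRunsB bs = (bs.takeWhile pvPrintableB).map (fun b => Char.ofNat b.toNat) := by
  rw [emitRunsB]
  split
  · rfl
  · rename_i b rest hr; rw [h] at hr; cases hr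

theorem emitRunsB_drop_cons (bs : List Int) (b : Int) (rest : List Int)
    (h : bs.dropWhile pvPrintableB = b :: rest) :
    emitRunsB bs = (bs.takeWhile pvPrintableB).map (fun b => Char.ofNat b.toNat)
      ++ ('\\' :: pvHex02x b) ++ emitRunsB rest := by
  rw [emitRunsB]
  split
  · rename_i hr; rw [h] at hr; cases hr
  · rename_i b' rest' hr; rw [h] at hr; cases hr; rfl

-- on an all-printable run the per-byte escapes are the plain characters
theorem escB_printable_run (run : List Int) (h : ∀ b ∈ run, pvPrintableB b = true) :
    (run.map escB).flatten = run.map (fun b => Char.ofNat b.toNat) := by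
  induction run with
  | nil => simp
  | cons b rest ih =>
    have hb := h b (by simp)
    simp [pvPrintableB] at hb
    have : escB b = [Char.ofNat b.toNat] := by
      unfold escB; rw [if_pos ⟨hb.1.1, hb.1.2, hb.2⟩]
    simp [this, ih (fun x hx => h x (by simp [hx]))]

-- the run-segmented emitter produces exactly the per-byte escapes, flattened
theorem emitRunsB_eq (bs : List Int) :
    emitRunsB bs = (bs.map escB).flatten := by
  induction hn : bs.length using Nat.strong_induction_on generalizing bs with
  | _ n ih =>
  cases hr : bs.dropWhile pvPrintableB with
  | nil =>
    have hall : ∀ b ∈ bs, pvPrintableB b = true := List.dropWhile_eq_nil_iff.mp hr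
    rw [emitRunsB_drop_nil bs hr, List.takeWhile_eq_self_iff.mpr hall,
      escB_printable_run bs hall]
  | cons b rest =>
    have hsplit : bs.takeWhile pvPrintableB ++ b :: rest = bs := by
      rw [← hr]; exact List.takeWhile_append_dropWhile
    have hp : ¬ pvPrintableB b = true := by
      have h0 : 0 < (bs.dropWhile pvPrintableB).length := by rw [hr]; simp
      have := List.dropWhile_get_zero_not (p := pvPrintableB) bs h0
      simpa [hr] using this
    have hesc : escB b = '\\' :: pvHex02x b := by
      unfold escB
      rw [if_neg]
      simp [pvPrintableB] at hp
      rintro ⟨h1, h2, h3⟩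
      exact h3 (hp h1 h2)
    have hlen : rest.length < n := by
      subst hn
      have := congrArg List.length hsplit
      simp at this; omega
    rw [emitRunsB_drop_cons bs b rest hr, ih rest.length hlen rest rfl]
    conv_rhs => rw [← hsplit]
    simp [escB_printable_run _ (fun x hx => List.mem_takeWhile_imp hx), hesc]

-- ===== VERDICT =====
theorem ascii_to_text_spec : Claim_equal_ascii_to_text := by
  intro blob _
  unfold Spec_ascii_to_text ascii_to_text ascii_to_text_alt
  show _ = String.ofList (emitRunsB (PySem.List.slice blob none
      (some (((PySem.List.index? blob 0).getD blob.length : Nat) : Int))))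
  rw [slice_index_eq_takeWhile, asciiLoopA_eq, emitRunsB_eq]
  simp
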